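-- pv_equiv track=rewrite | github.com/pizzadancer/python_projects | domain_name_finder.py | remove_www
-- ===== SOURCE A (Python) =====
-- def remove_www(url):
--     www_count = 0
--     index = 0
--     # check the url, when you find 3 w's, return the text after the 3 w's + 1 (the dot)
--     for char in url:
--         if char == "w":
--             www_count += 1
--         if www_count > 2:
--             return url[index + 2:]
--
--         index += 1
-- ===== SOURCE B (Python) =====
-- def remove_www(url):
--     parts = url.split("w", 3)
--     if len(parts) == 4:
--         return parts[3][1:]
--     return None
-- ===== Notes on version B (the rewrite author's own statement) =====
-- stated objective: idiomatic
-- what changed: B delegates the scan to the standard library: url.split("w", 3) plus a part-count check replaces A's manual loop that maintains a running count and index and returns early from inside it; the answer is the fourth part with its first character dropped.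
import Mathlib
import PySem

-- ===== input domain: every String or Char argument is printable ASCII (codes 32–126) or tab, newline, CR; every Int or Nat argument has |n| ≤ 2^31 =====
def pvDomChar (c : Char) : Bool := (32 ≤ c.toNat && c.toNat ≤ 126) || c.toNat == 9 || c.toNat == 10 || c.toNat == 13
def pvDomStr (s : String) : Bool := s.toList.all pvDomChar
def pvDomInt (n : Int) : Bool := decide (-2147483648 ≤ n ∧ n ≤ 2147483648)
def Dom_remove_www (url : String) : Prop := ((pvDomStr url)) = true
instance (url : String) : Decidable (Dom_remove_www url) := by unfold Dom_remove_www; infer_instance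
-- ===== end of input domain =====

-- B delegates to the library splitter: url.split("w", 3) and a part-count check replace
-- A's manual counting scan with early return; objective: idiomatic (same cost).

-- ===== PORT A =====
-- A's for-loop with early return: structural recursion over the characters,
-- carrying www_count and index exactly as the Python does.
def removeWwwLoop (url : String) : List Char → Int → Int → Option String
  | [], _, _ => none
  | c :: rest, count, index =>
    let count' := if c = 'w' then count + 1 else count
    if count' > 2 then some (PySem.Str.slice url (some (index + 2)) none)
    else removeWwwLoop url rest count' (index + 1)

def remove_www (url : String) : Option String :=
  removeWwwLoop url url.toList 0 0

-- ===== PORT B =====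
-- hand port of str.split(sep, maxsplit) for the single-character separator "w"
-- (exact for a nonempty single-char sep: cut at the first occurrence, at most n cuts)
def cutW : List Char → Option (List Char × List Char)
  | [] => none
  | c :: cs => if c = 'w' then some ([], cs)
               else (cutW cs).map (fun p => (c :: p.1, p.2))

def splitW : Nat → List Char → List (List Char)
  | 0, cs => [cs]
  | n + 1, cs =>
    match cutW cs with
    | none => [cs]
    | some (pre, rest) => pre :: splitW n rest

def remove_www_alt (url : String) : Option String :=
  let parts := splitW 3 url.toList
  if h : parts.length = 4 then
    -- parts[3][1:] : slice-from-1 of a string is drop 1 of its characters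
    some (String.ofList ((parts[3]'(by omega)).drop 1))
  else none

-- ===== PRECONDITION & SPEC =====
def Spec_remove_www (url : String) (out : Option String) : Prop := out = remove_www_alt url
instance (url : String) (out : Option String) : Decidable (Spec_remove_www url out) := by unfold Spec_remove_www; infer_instance

-- ===== CLAIM (what is proved, stated in full; the proofs are below) =====
def Claim_equal_remove_www : Prop := ∀ (url : String), Dom_remove_www url → Spec_remove_www url (remove_www url)

-- ===== LEMMAS AND PROOFS =====

-- reference: the suffix of cs strictly after the (k+1)-th 'w', if it exists
def afterW : Nat → List Char → Option (List Char)
  | _, [] => none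
  | k, c :: cs =>
    if c = 'w' then (match k with | 0 => some cs | k' + 1 => afterW k' cs)
    else afterW k cs

-- A's loop, started with count = 2 - k, returns the slice two past the (k+1)-th 'w'
theorem loop_eq (url : String) (cs : List Char) : ∀ (s : Int) (k : Nat), k ≤ 2 →
    removeWwwLoop url cs (2 - (k : Int)) s =
      (afterW k cs).map
        (fun t => PySem.Str.slice url (some (s + ((cs.length : Int) - t.length) + 1)) none) := by
  induction cs with
  | nil => intro s k _; simp [removeWwwLoop, afterW]
  | cons c rest ih =>
    intro s k hk
    by_cases hc : c = 'w'
    · subst hc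
      cases k with
        | zero =>
          have hgt : ((2 : Int) - (0 : Nat) + 1 > 2) := by norm_num
          simp only [removeWwwLoop, if_true, if_pos hgt, afterW, Option.map_some]
          have : s + ((('w' :: rest).length : Int) - rest.length) + 1 = s + 2 := by
            simp only [List.length_cons]; push_cast; ring
          rw [this]
        | succ k' =>
          have h2 : (2 : Int) - ((k' : Int) + 1) + 1 = 2 - k' := by omega
          have hgt : ¬ ((2 : Int) - k' > 2) := by omega
          simp only [removeWwwLoop, if_true, Nat.cast_add, Nat.cast_one, h2, if_neg hgt]
          rw [ih (s + 1) k' (by omega)]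
          simp only [afterW, if_true]
          cases afterW k' rest with
          | none => rfl
          | some t =>
            simp only [Option.map_some]
            have : s + 1 + ((rest.length : Int) - t.length) + 1
                = s + ((('w' :: rest).length : Int) - t.length) + 1 := by
              simp only [List.length_cons]; push_cast; ring
            rw [this]
    · have h1 : ¬ ((2 : Int) - k > 2) := by omega
      simp only [removeWwwLoop, if_neg hc, if_neg h1]
      rw [ih (s + 1) k hk]
      simp only [afterW, if_neg hc]
      cases afterW k rest with
      | none => rfl
      | some t =>
        simp only [Option.map_some]
        have : s + 1 + ((rest.length : Int) - t.length) + 1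
            = s + (((c :: rest).length : Int) - t.length) + 1 := by
          simp only [List.length_cons]; push_cast; ring
        rw [this]

-- if afterW returns t, then t is the suffix of cs dropped at cs.length - t.length, strictly shorter
theorem afterW_suffix (k : Nat) (cs t : List Char) (h : afterW k cs = some t) :
    t.length < cs.length ∧ cs.drop (cs.length - t.length) = t := by
  induction cs generalizing k with
  | nil => simp [afterW] at h
  | cons c rest ih =>
    simp only [afterW] at h
    by_cases hc : c = 'w'
    · rw [if_pos hc] at h
      cases k with
      | zero =>
        simp at h
        subst h
        exact ⟨by simp, by simp⟩
      | succ k' =>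
        obtain ⟨hlt, hdrop⟩ := ih k' h
        refine ⟨by simpa using Nat.lt_succ_of_lt hlt, ?_⟩
        have he : (c :: rest).length - t.length = (rest.length - t.length) + 1 := by
          simp; omega
        rw [he, List.drop_succ_cons, hdrop]
    · rw [if_neg hc] at h
      obtain ⟨hlt, hdrop⟩ := ih k h
      refine ⟨by simpa using Nat.lt_succ_of_lt hlt, ?_⟩
      have he : (c :: rest).length - t.length = (rest.length - t.length) + 1 := by
        simp; omega
      rw [he, List.drop_succ_cons, hdrop]

-- the (k+1)-th entry of splitW (k+1) cs is exactly afterW k cs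
theorem splitW_getElem? (cs : List Char) : ∀ (k : Nat),
    (splitW (k + 1) cs)[k + 1]? = afterW k cs := by
  induction cs with
  | nil => intro k; simp [splitW, cutW, afterW]
  | cons c rest ih =>
    intro k
    by_cases hc : c = 'w'
    · simp only [splitW, cutW, hc, if_true]
      cases k with
      | zero => simp [splitW, afterW]
      | succ k' =>
        simp only [afterW, if_true]
        simpa using ih k'
    · have hcc : cutW (c :: rest) = (cutW rest).map (fun p => (c :: p.1, p.2)) := by
        simp [cutW, hc]
      have hgoal : afterW k (c :: rest) = afterW k rest := by simp [afterW, hc]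
      cases hcut : cutW rest with
      | none =>
        have h := ih k
        rw [splitW, hcut] at h
        rw [splitW, hcc, hcut, hgoal]
        simpa using h
      | some pr =>
        have h := ih k
        rw [splitW, hcut] at h
        rw [splitW, hcc, hcut, hgoal, ← h]
        simp
-- splitW n cs is nonempty and has at most n + 1 parts
theorem splitW_length (n : Nat) (cs : List Char) :
    0 < (splitW n cs).length ∧ (splitW n cs).length ≤ n + 1 := by
  induction n generalizing cs with
  | zero => simp [splitW]
  | succ m ih =>
    simp only [splitW]
    cases cutW cs with
    | none => simp
    | some pr =>
      obtain ⟨h1, h2⟩ := ih pr.2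
      simp only [List.length_cons]
      omega

-- ===== VERDICT (by name: the statement is the Claim_ definition above) =====
theorem remove_www_spec : Claim_equal_remove_www := by
  intro url _
  show remove_www url = remove_www_alt url
  have hA := loop_eq url url.toList 0 2 (by omega)
  have h0 : (2 : Int) - ((2 : Nat) : Int) = 0 := by norm_num
  rw [h0] at hA
  rw [remove_www, hA, remove_www_alt]
  have hB := splitW_getElem? url.toList 2
  norm_num at hB
  have hlen := splitW_length 3 url.toList
  cases hAf : afterW 2 url.toList with
  | none =>
    rw [hAf] at hB
    have hne : ¬ (splitW 3 url.toList).length = 4 := by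
      intro h4
      rw [List.getElem?_eq_getElem (by omega)] at hB
      simp at hB
    simp [hne]
  | some t =>
    rw [hAf] at hB
    obtain ⟨hlt, hdrop⟩ := afterW_suffix 2 url.toList t hAf
    have h4 : (splitW 3 url.toList).length = 4 := by
      by_contra h4
      rw [List.getElem?_eq_none (by omega)] at hB
      simp at hB
    simp only [Option.map_some, dif_pos h4]
    have hel : (splitW 3 url.toList)[3]'(by omega) = t := by
      rw [List.getElem?_eq_getElem (by omega)] at hB
      simpa using hB
    rw [hel]
    have hcast : (0 : Int) + ((url.toList.length : Int) - t.length) + 1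
        = ((url.toList.length - t.length + 1 : Nat) : Int) := by
      push_cast [Nat.le_of_lt hlt]; ring
    rw [hcast]
    congr 1
    have hdr : url.toList.drop (url.toList.length - t.length + 1) = t.drop 1 := by
      rw [← List.drop_drop, hdrop]
    simp only [PySem.Str.slice, PySem.Chars.slice_eq_listSlice, PySem.List.slice_from_natCast, hdr]
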